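-- pv_equiv track=rewrite | github.com/jonathanyulan99/SDE-Fundamentals | ALL/Formation/Algo Workout/Practical Problems/possible_portmanteau.py | isPortmanteau
-- ===== SOURCE A (Python) =====
-- def isPortmanteau(word1: str, word2: str, proposed: str) -> bool:
--     def check(w1: str, w2: str):
--         p1 = 0
--         while p1 < len(w1) and proposed[p1] == w1[p1]:
--             p1 += 1
--         p1 -= 1 # the loop iterated 1 too far
--
--         p2 = len(proposed) - 1
--         s2 = len(w2) - 1
--         while s2 >= 0 and proposed[p2] == w2[s2]:
--             s2 -= 1
--             p2 -= 1
--
--         return p1 >= p2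
--
--     # Rule out compounds
--     if proposed == word1 + word2: return False
--     if proposed == word2 + word1: return False
--
--     # The portmanteau can't exactly match either source word
--     if proposed == word1 or proposed == word2: return False
--
--     return check(word1, word2) or check(word2, word1)
-- ===== SOURCE B (Python) =====
-- def isPortmanteau(word1: str, word2: str, proposed: str) -> bool:
--     # Rule out compounds and exact matches (same outer guards as the task states).
--     if proposed == word1 + word2 or proposed == word2 + word1:
--         return False
--     if proposed == word1 or proposed == word2:
--         return False
--
--     n = len(proposed)
--
--     def splits(w1: str, w2: str) -> bool:
--         # proposed is a portmanteau of (w1, w2) iff it can be cut into a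
--         # prefix of w1 followed by a suffix of w2.
--         return any(
--             i <= len(w1) and n - i <= len(w2)
--             and proposed[:i] == w1[:i]
--             and proposed[i:] == w2[len(w2) - (n - i):]
--             for i in range(n + 1)
--         )
--
--     return splits(word1, word2) or splits(word2, word1)
-- ===== Notes on version B (the rewrite author's own statement) =====
-- stated objective: alternative
-- what changed: The greedy two-pointer check (longest matching prefix / suffix, then pointer comparison) is replaced by a declarative search over all split points i of proposed into a word1-prefix proposed[:i] and a word2-suffix proposed[i:]; the three outer guards are kept verbatim.
import Mathlib
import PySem

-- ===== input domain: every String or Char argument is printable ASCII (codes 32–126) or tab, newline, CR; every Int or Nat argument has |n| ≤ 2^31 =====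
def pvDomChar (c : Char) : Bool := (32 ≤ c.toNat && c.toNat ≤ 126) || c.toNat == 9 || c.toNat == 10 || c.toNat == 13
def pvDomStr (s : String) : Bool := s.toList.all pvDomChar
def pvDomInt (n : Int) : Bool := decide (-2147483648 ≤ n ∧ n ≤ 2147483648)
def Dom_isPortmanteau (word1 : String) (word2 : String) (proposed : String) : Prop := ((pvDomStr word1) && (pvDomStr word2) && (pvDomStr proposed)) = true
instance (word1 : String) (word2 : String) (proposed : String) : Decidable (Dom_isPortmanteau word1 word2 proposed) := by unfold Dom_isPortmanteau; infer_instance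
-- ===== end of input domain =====

-- B replaces A's greedy two-pointer check by a declarative search over all split points of
-- `proposed` into a word1-prefix plus word2-suffix (objective: alternative, same guards kept).


-- ===== PORT A =====
-- first while loop of check: `while p1 < len(w1) and proposed[p1] == w1[p1]: p1 += 1`;
-- p1 only ever takes values 0,1,2,… so it is a Nat and proposed[p1] is getElem?;
-- none = the IndexError Python raises when p1 runs past the end of proposed.
def pvLoop1 (proposed w1 : List Char) (p1 : Nat) : Option Nat :=
  if h : p1 < w1.length then
    match proposed[p1]? with
    | none => none
    | some c => if c = w1[p1] then pvLoop1 proposed w1 (p1 + 1) else some p1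
  else some p1
termination_by w1.length - p1

-- second while loop of check: `while s2 >= 0 and proposed[p2] == w2[s2]: s2 -= 1; p2 -= 1`;
-- p2 may go negative (Python wraps) so proposed[p2] is PySem pyGet?; returns the final p2.
def pvLoop2 (proposed w2 : List Char) (p2 s2 : Int) : Option Int :=
  if _h : 0 ≤ s2 then
    match PySem.List.pyGet? proposed p2, PySem.List.pyGet? w2 s2 with
    | some c, some d => if c = d then pvLoop2 proposed w2 (p2 - 1) (s2 - 1) else some p2
    | _, _ => none
  else some p2
termination_by (s2 + 1).toNat
decreasing_by omega

-- the inner helper `check(w1, w2)` (closing over proposed); none = IndexError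
def pvCheck (proposed w1 w2 : List Char) : Option Bool :=
  match pvLoop1 proposed w1 0 with
  | none => none
  | some p1stop =>
    let p1 : Int := (p1stop : Int) - 1   -- `p1 -= 1  # the loop iterated 1 too far`
    match pvLoop2 proposed w2 ((proposed.length : Int) - 1) ((w2.length : Int) - 1) with
    | none => none
    | some p2 => some (decide (p1 ≥ p2))

def isPortmanteau (word1 : String) (word2 : String) (proposed : String) : Bool :=
  if proposed.toList = word1.toList ++ word2.toList then false
  else if proposed.toList = word2.toList ++ word1.toList then false
  else if proposed.toList = word1.toList ∨ proposed.toList = word2.toList then false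
  else
    -- `return check(word1, word2) or check(word2, word1)`: `or` short-circuits, so the
    -- second call is reached only when the first returns False; the `.getD false` values
    -- stand for the IndexErrors Pre_ excludes (nones are unreachable under Pre_)
    match pvCheck proposed.toList word1.toList word2.toList with
    | none => false
    | some b1 => if b1 then true else (pvCheck proposed.toList word2.toList word1.toList).getD false

-- ===== PORT B =====
-- `splits(w1, w2)`: any split point i with proposed[:i] a prefix of w1 and proposed[i:] a suffix of w2
def pvSplits (proposed w1 w2 : List Char) : Bool :=
  (PySem.List.pyRange 0 ((proposed.length : Int) + 1) 1).any (fun i =>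
    decide (i ≤ (w1.length : Int)) &&
    decide ((proposed.length : Int) - i ≤ (w2.length : Int)) &&
    (PySem.List.slice proposed none (some i) = PySem.List.slice w1 none (some i)) &&
    (PySem.List.slice proposed (some i) none =
      PySem.List.slice w2 (some ((w2.length : Int) - ((proposed.length : Int) - i))) none))

def isPortmanteau_alt (word1 : String) (word2 : String) (proposed : String) : Bool :=
  if proposed.toList = word1.toList ++ word2.toList then false
  else if proposed.toList = word2.toList ++ word1.toList then false
  else if proposed.toList = word1.toList ∨ proposed.toList = word2.toList then false
  else pvSplits proposed.toList word1.toList word2.toList ||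
       pvSplits proposed.toList word2.toList word1.toList

-- ===== PRECONDITION & SPEC =====
-- `check(w, v)` hits an IndexError exactly when proposed is a proper prefix of w (first loop
-- runs off the end of proposed) or v ends in proposed twice with a spare character (the
-- suffix loop's negative indexing wraps past -len(proposed)); this covers empty proposed too.
def pvRch (p w v : List Char) : Prop :=
  (p.length < w.length ∧ p = w.take p.length) ∨
  (2 * p.length < v.length ∧ v.drop (v.length - 2 * p.length) = p ++ p)

-- "proposed can be cut at some i into a prefix of w1 and a suffix of w2" — the closed-form
-- shape condition under which A's first `check` call returns True (so the second, possibly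
-- raising call is short-circuited away by `or`).
def pvSplitB (p w1 w2 : List Char) : Bool :=
  (List.range (p.length + 1)).any (fun i =>
    decide (i ≤ w1.length) && decide (p.length - i ≤ w2.length) &&
    (p.take i == w1.take i) && (p.drop i == w2.drop (w2.length - (p.length - i))))

-- Pre_ excludes exactly the inputs on which A raises IndexError: past the guards, those where
-- check(word1, word2) raises, or where it returns False and check(word2, word1) raises.
def Pre_isPortmanteau (word1 : String) (word2 : String) (proposed : String) : Prop :=
  proposed.toList = word1.toList ++ word2.toList ∨
  proposed.toList = word2.toList ++ word1.toList ∨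
  proposed.toList = word1.toList ∨ proposed.toList = word2.toList ∨
  (¬ pvRch proposed.toList word1.toList word2.toList ∧
   (pvSplitB proposed.toList word1.toList word2.toList = true ∨
    ¬ pvRch proposed.toList word2.toList word1.toList))

instance (word1 : String) (word2 : String) (proposed : String) : Decidable (Pre_isPortmanteau word1 word2 proposed) := by unfold Pre_isPortmanteau pvRch; infer_instance

def pvWitness_isPortmanteau : String × String × String := ("book", "worm", "bworm")

def Spec_isPortmanteau (word1 : String) (word2 : String) (proposed : String) (out : Bool) : Prop := out = isPortmanteau_alt word1 word2 proposed
instance (word1 : String) (word2 : String) (proposed : String) (out : Bool) : Decidable (Spec_isPortmanteau word1 word2 proposed out) := by unfold Spec_isPortmanteau; infer_instance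

-- ===== CLAIM (what is proved, stated in full; the proofs are below) =====
def Claim_equal_isPortmanteau : Prop := ∀ (word1 : String) (word2 : String) (proposed : String), Dom_isPortmanteau word1 word2 proposed → Pre_isPortmanteau word1 word2 proposed → Spec_isPortmanteau word1 word2 proposed (isPortmanteau word1 word2 proposed)


-- ===== LEMMAS AND PROOFS =====

-- length of the longest common prefix of two lists
def pvLcp : List Char → List Char → Nat
  | x :: xs, y :: ys => if x = y then pvLcp xs ys + 1 else 0
  | _, _ => 0

-- the shape both while loops share, structurally on lists: scan while the second list has
-- characters and they match the first; none = the first list ran out first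
def pvScan : List Char → List Char → Option Nat
  | _, [] => some 0
  | [], _ :: _ => none
  | x :: xs, y :: ys => if x = y then (pvScan xs ys).map (· + 1) else some 0

-- "proposed can be split at i into a prefix of w1 and a suffix of w2"
def pvSplitEx (p w1 w2 : List Char) : Prop :=
  ∃ i, i ≤ p.length ∧ i ≤ w1.length ∧ p.length - i ≤ w2.length ∧
    p.take i = w1.take i ∧ p.drop i = w2.drop (w2.length - (p.length - i))

theorem pvSplitB_iff (p w1 w2 : List Char) : pvSplitB p w1 w2 = true ↔ pvSplitEx p w1 w2 := by
  unfold pvSplitB pvSplitEx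
  rw [List.any_eq_true]
  constructor
  · rintro ⟨i, hmem, hp⟩
    rw [List.mem_range] at hmem
    simp only [Bool.and_eq_true, decide_eq_true_iff, beq_iff_eq] at hp
    exact ⟨i, by omega, hp.1.1.1, hp.1.1.2, hp.1.2, hp.2⟩
  · rintro ⟨i, h1, h2, h3, h4, h5⟩
    refine ⟨i, List.mem_range.mpr (by omega), ?_⟩
    simp only [Bool.and_eq_true, decide_eq_true_iff, beq_iff_eq]
    exact ⟨⟨⟨h2, h3⟩, h4⟩, h5⟩

theorem pvLcp_le_left : ∀ (xs ys : List Char), pvLcp xs ys ≤ xs.length := by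
  intro xs ys
  induction xs generalizing ys with
  | nil => simp [pvLcp]
  | cons x xs ih =>
    cases ys with
    | nil => simp [pvLcp]
    | cons y ys =>
      simp only [pvLcp]
      split_ifs with h
      · simpa using ih ys
      · simp

theorem pvLcp_le_right : ∀ (xs ys : List Char), pvLcp xs ys ≤ ys.length := by
  intro xs ys
  induction xs generalizing ys with
  | nil => simp [pvLcp]
  | cons x xs ih =>
    cases ys with
    | nil => simp [pvLcp]
    | cons y ys =>
      simp only [pvLcp]
      split_ifs with h
      · simpa using ih ys
      · simp

theorem pvLcp_take : ∀ (xs ys : List Char), xs.take (pvLcp xs ys) = ys.take (pvLcp xs ys) := by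
  intro xs ys
  induction xs generalizing ys with
  | nil => simp [pvLcp]
  | cons x xs ih =>
    cases ys with
    | nil => simp [pvLcp]
    | cons y ys =>
      simp only [pvLcp]
      split_ifs with h
      · simp [List.take_succ_cons, h, ih ys]
      · simp

theorem pvLcp_take_of_le (xs ys : List Char) (i : Nat) (h : i ≤ pvLcp xs ys) :
    xs.take i = ys.take i := by
  have h1 := pvLcp_take xs ys
  calc xs.take i = (xs.take (pvLcp xs ys)).take i := by rw [List.take_take, Nat.min_eq_left h]
    _ = (ys.take (pvLcp xs ys)).take i := by rw [h1]
    _ = ys.take i := by rw [List.take_take, Nat.min_eq_left h]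

theorem le_pvLcp : ∀ (xs ys : List Char) (k : Nat), k ≤ xs.length → k ≤ ys.length →
    xs.take k = ys.take k → k ≤ pvLcp xs ys := by
  intro xs ys k
  induction xs generalizing ys k with
  | nil => intro h1 _ _; simp at h1; simp [h1]
  | cons x xs ih =>
    intro h1 h2 h3
    cases ys with
    | nil => simp at h2; simp [h2]
    | cons y ys =>
      cases k with
      | zero => simp
      | succ k =>
        simp only [List.take_succ_cons, List.cons.injEq] at h3
        simp only [pvLcp, h3.1, if_true]
        have := ih ys k (by simpa using h1) (by simpa using h2) h3.2
        omega

theorem pvScan_eq (xs ys : List Char) :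
    pvScan xs ys = if xs.length < ys.length ∧ pvLcp xs ys = xs.length then none
                   else some (pvLcp xs ys) := by
  induction xs generalizing ys with
  | nil =>
    cases ys with
    | nil => simp [pvScan, pvLcp]
    | cons y ys => simp [pvScan, pvLcp]
  | cons x xs ih =>
    cases ys with
    | nil => simp [pvScan, pvLcp]
    | cons y ys =>
      by_cases h : x = y
      · have hl : pvLcp (x :: xs) (y :: ys) = pvLcp xs ys + 1 := by simp [pvLcp, h]
        have hs : pvScan (x :: xs) (y :: ys) = (pvScan xs ys).map (· + 1) := by
          simp [pvScan, h]
        rw [hs, ih ys, hl]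
        have hle := pvLcp_le_left xs ys
        by_cases hc : xs.length < ys.length ∧ pvLcp xs ys = xs.length
        · rw [if_pos hc, if_pos (by simp only [List.length_cons]; omega)]; rfl
        · rw [if_neg hc, if_neg (by simp only [List.length_cons]; omega)]; rfl
      · have hl : pvLcp (x :: xs) (y :: ys) = 0 := by simp [pvLcp, h]
        have hs : pvScan (x :: xs) (y :: ys) = some 0 := by simp [pvScan, h]
        rw [hs, hl, if_neg (by simp)]

theorem pvLoop1_eq_scan (p w1 : List Char) (k : Nat) :
    pvLoop1 p w1 k = (pvScan (p.drop k) (w1.drop k)).map (· + k) := by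
  fun_induction pvLoop1 p w1 k with
  | case1 k h hnone =>
    have hp : p.length ≤ k := List.getElem?_eq_none_iff.mp hnone
    rw [List.drop_eq_nil_of_le hp, List.drop_eq_getElem_cons h]
    simp [pvScan]
  | case2 k h hsome ih =>
    have hk : k < p.length := by
      by_contra hk
      rw [List.getElem?_eq_none_iff.mpr (by omega)] at hsome
      simp at hsome
    have hc : p[k] = w1[k] := by
      rw [List.getElem?_eq_getElem hk] at hsome; exact Option.some.inj hsome
    rw [ih, List.drop_eq_getElem_cons hk, List.drop_eq_getElem_cons h]
    simp only [pvScan, hc, if_true, Option.map_map]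
    congr 1
    funext u
    simp only [Function.comp_apply]
    omega
  | case3 k h c hsome hne =>
    have hk : k < p.length := by
      by_contra hk
      rw [List.getElem?_eq_none_iff.mpr (by omega)] at hsome
      simp at hsome
    have hc : c = p[k] := by
      rw [List.getElem?_eq_getElem hk] at hsome; exact (Option.some.inj hsome).symm
    rw [List.drop_eq_getElem_cons hk, List.drop_eq_getElem_cons h]
    have : ¬ p[k] = w1[k] := by rw [← hc]; exact hne
    simp [pvScan, this]
  | case4 k h =>
    rw [show List.drop k w1 = [] from List.drop_eq_nil_of_le (by omega)]
    simp [pvScan]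

theorem pvWrapGet (p : List Char) (t : Nat) (h : t < 2 * p.length) :
    PySem.List.pyGet? p ((p.length : Int) - 1 - t) = (p.reverse ++ p.reverse)[t]? := by
  by_cases ht : t < p.length
  · rw [PySem.List.pyGet?_of_nonneg p (by omega)]
    have h1 : ((p.length : Int) - 1 - t).toNat = p.length - 1 - t := by omega
    rw [h1, List.getElem?_eq_getElem (by omega : p.length - 1 - t < p.length),
        List.getElem?_eq_getElem (by simp; omega : t < (p.reverse ++ p.reverse).length)]
    rw [List.getElem_append_left (by simpa using ht), List.getElem_reverse]
  · have hk : (p.length : Int) - 1 - t = -(((t + 1 - p.length : Nat)) : Int) := by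
      omega
    rw [hk, PySem.List.pyGet?_neg_natCast p (t + 1 - p.length) (by omega) (by omega)]
    rw [List.getElem?_eq_getElem (by omega : p.length - (t + 1 - p.length) < p.length),
        List.getElem?_eq_getElem (by simp; omega : t < (p.reverse ++ p.reverse).length)]
    rw [List.getElem_append_right (by simpa using ht), List.getElem_reverse]
    have hAB : p.length - (t + 1 - p.length) = p.length - 1 - (t - p.reverse.length) := by
      simp only [List.length_reverse]; omega
    simp only [hAB]

theorem pvLoop2_eq_scan (p w2 : List Char) (t : Nat) :
    pvLoop2 p w2 ((p.length : Int) - 1 - t) ((w2.length : Int) - 1 - t) =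
      (pvScan ((p.reverse ++ p.reverse).drop t) (w2.reverse.drop t)).map
        (fun u => (p.length : Int) - 1 - ((t + u : Nat) : Int)) := by
  suffices H : ∀ d t, w2.length - t ≤ d →
      pvLoop2 p w2 ((p.length : Int) - 1 - t) ((w2.length : Int) - 1 - t) =
      (pvScan ((p.reverse ++ p.reverse).drop t) (w2.reverse.drop t)).map
        (fun u => (p.length : Int) - 1 - ((t + u : Nat) : Int)) from H _ t le_rfl
  intro d
  induction d with
  | zero =>
    intro t hle
    have hm : w2.length ≤ t := by omega
    rw [pvLoop2]
    rw [dif_neg (by omega)]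
    rw [show w2.reverse.drop t = [] from List.drop_eq_nil_of_le (by simpa using hm)]
    simp [pvScan]
  | succ d ih =>
    intro t hle
    by_cases hm : w2.length ≤ t
    · rw [pvLoop2]
      rw [dif_neg (by omega)]
      rw [show w2.reverse.drop t = [] from List.drop_eq_nil_of_le (by simpa using hm)]
      simp [pvScan]
    · rw [not_le] at hm
      rw [pvLoop2, dif_pos (by omega : (0:Int) ≤ (w2.length : Int) - 1 - t)]
      have hw : PySem.List.pyGet? w2 ((w2.length : Int) - 1 - t) = some (w2.reverse[t]'(by simpa using hm)) := by
        rw [PySem.List.pyGet?_eq_some_getElem w2 (by omega) (by omega)]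
        congr 1
        rw [List.getElem_reverse]
        congr 1
        omega
      have hWd : w2.reverse.drop t = w2.reverse[t]'(by simpa using hm) :: w2.reverse.drop (t + 1) :=
        List.drop_eq_getElem_cons (by simpa using hm)
      by_cases h2n : t < 2 * p.length
      · have hq : (p.reverse ++ p.reverse)[t]? = some ((p.reverse ++ p.reverse)[t]'(by simp; omega)) :=
          List.getElem?_eq_getElem (by simp; omega)
        have hp := pvWrapGet p t h2n
        rw [hq] at hp
        rw [hp, hw]
        have hQd : (p.reverse ++ p.reverse).drop t =
            (p.reverse ++ p.reverse)[t]'(by simp; omega) :: (p.reverse ++ p.reverse).drop (t + 1) :=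
          List.drop_eq_getElem_cons (by simp; omega)
        rw [hQd, hWd]
        simp only [pvScan]
        by_cases heq : (p.reverse ++ p.reverse)[t]'(by simp; omega) = w2.reverse[t]'(by simpa using hm)
        · rw [if_pos heq, if_pos heq]
          have e1 : (p.length : Int) - 1 - t - 1 = (p.length : Int) - 1 - (t + 1 : Nat) := by push_cast; omega
          have e2 : (w2.length : Int) - 1 - t - 1 = (w2.length : Int) - 1 - (t + 1 : Nat) := by push_cast; omega
          rw [e1, e2, ih (t + 1) (by omega), Option.map_map]
          congr 1
          funext u
          simp only [Function.comp_apply]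
          push_cast
          ring
        · rw [if_neg heq, if_neg heq]
          simp
      · have hp : PySem.List.pyGet? p ((p.length : Int) - 1 - t) = none := by
          rw [PySem.List.pyGet?_eq_none_iff p _]
          intro hin
          unfold PySem.Raise.InRange at hin
          omega
        rw [hp]
        rw [show (p.reverse ++ p.reverse).drop t = [] from List.drop_eq_nil_of_le (by simp; omega)]
        rw [hWd]
        simp [pvScan]

theorem pvSplitEx_iff (p w1 w2 : List Char) :
    pvSplitEx p w1 w2 ↔
      p.length ≤ pvLcp p w1 + pvLcp (p.reverse ++ p.reverse) w2.reverse := by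
  constructor
  · rintro ⟨i, hin, hiw1, hk2, htake, hdrop⟩
    have hia : i ≤ pvLcp p w1 := le_pvLcp p w1 i hin hiw1 htake
    have hkr : p.length - i ≤ pvLcp (p.reverse ++ p.reverse) w2.reverse := by
      apply le_pvLcp
      · simp; omega
      · simp; omega
      · rw [List.take_append_of_le_length (by simp only [List.length_reverse]; omega), List.take_reverse,
            List.take_reverse]
        rw [show p.length - (p.length - i) = i from by omega, hdrop]
    omega
  · intro h
    have ha1 := pvLcp_le_left p w1
    have ha2 := pvLcp_le_right p w1
    have hr2 : pvLcp (p.reverse ++ p.reverse) w2.reverse ≤ w2.length := by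
      simpa using pvLcp_le_right (p.reverse ++ p.reverse) w2.reverse
    refine ⟨p.length - min (pvLcp (p.reverse ++ p.reverse) w2.reverse) p.length,
      by omega, by omega, by omega, ?_, ?_⟩
    · exact pvLcp_take_of_le p w1 _ (by omega)
    · have hk : p.length - (p.length - min (pvLcp (p.reverse ++ p.reverse) w2.reverse) p.length)
          = min (pvLcp (p.reverse ++ p.reverse) w2.reverse) p.length := by omega
      rw [hk]
      have := pvLcp_take_of_le (p.reverse ++ p.reverse) w2.reverse
        (min (pvLcp (p.reverse ++ p.reverse) w2.reverse) p.length) (by omega)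
      rw [List.take_append_of_le_length (by simp only [List.length_reverse]; omega), List.take_reverse,
          List.take_reverse] at this
      exact List.reverse_injective this

theorem pvCheck_eq (p w1 w2 : List Char) (h : ¬ pvRch p w1 w2) :
    ∃ b, pvCheck p w1 w2 = some b ∧ (b = true ↔ pvSplitEx p w1 w2) := by
  have hna : ¬ (p.length < w1.length ∧ p = w1.take p.length) := fun hx => h (Or.inl hx)
  have hnb : ¬ (2 * p.length < w2.length ∧ w2.drop (w2.length - 2 * p.length) = p ++ p) :=
    fun hx => h (Or.inr hx)
  have h1 : pvLoop1 p w1 0 = some (pvLcp p w1) := by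
    rw [pvLoop1_eq_scan, List.drop_zero, List.drop_zero, pvScan_eq, if_neg]
    · simp
    · rintro ⟨hl, he⟩
      apply hna
      refine ⟨hl, ?_⟩
      have ht := pvLcp_take p w1
      rw [he, List.take_length] at ht
      exact ht
  have h2 : pvLoop2 p w2 ((p.length : Int) - 1) ((w2.length : Int) - 1) =
      some ((p.length : Int) - 1 - (pvLcp (p.reverse ++ p.reverse) w2.reverse : Int)) := by
    have h0 := pvLoop2_eq_scan p w2 0
    simp only [Nat.cast_zero, sub_zero, List.drop_zero, Nat.zero_add] at h0
    rw [pvScan_eq, if_neg] at h0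
    · simpa using h0
    · rintro ⟨hl, he⟩
      apply hnb
      simp only [List.length_append, List.length_reverse] at hl he
      refine ⟨by omega, ?_⟩
      have ht := pvLcp_take (p.reverse ++ p.reverse) w2.reverse
      rw [he] at ht
      rw [List.take_of_length_le (by simp only [List.length_append, List.length_reverse]; omega), List.take_reverse] at ht
      have hqq := congrArg List.reverse ht
      rw [two_mul]
      simpa [List.reverse_append] using hqq.symm
  refine ⟨_, by rw [pvCheck, h1, h2], ?_⟩
  rw [decide_eq_true_iff, pvSplitEx_iff]
  constructor
  · intro hge
    have := pvLcp_le_left p w1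
    omega
  · intro hle
    omega

theorem pvSplits_iff (p w1 w2 : List Char) :
    pvSplits p w1 w2 = true ↔ pvSplitEx p w1 w2 := by
  unfold pvSplits
  rw [List.any_eq_true]
  constructor
  · rintro ⟨i, hmem, hp⟩
    rw [PySem.List.mem_pyRange_one] at hmem
    simp only [Bool.and_eq_true, decide_eq_true_iff] at hp
    obtain ⟨⟨⟨g1, g2⟩, g3⟩, g4⟩ := hp
    have hi0 : (0:Int) ≤ i := hmem.1
    have hin : (i.toNat : Int) = i := Int.toNat_of_nonneg hi0
    rw [PySem.List.slice_to p hi0, PySem.List.slice_to w1 hi0] at g3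
    rw [PySem.List.slice_from p hi0,
        PySem.List.slice_from w2 (by omega : (0:Int) ≤ (w2.length : Int) - ((p.length : Int) - i))] at g4
    refine ⟨i.toNat, by omega, by omega, by omega, g3, ?_⟩
    have he : ((w2.length : Int) - ((p.length : Int) - i)).toNat = w2.length - (p.length - i.toNat) := by
      omega
    rw [he] at g4
    exact g4
  · rintro ⟨i, h1, h2, h3, h4, h5⟩
    refine ⟨(i : Int), PySem.List.mem_pyRange_one.mpr ⟨by omega, by omega⟩, ?_⟩
    simp only [Bool.and_eq_true, decide_eq_true_iff]
    refine ⟨⟨⟨by omega, by omega⟩, ?_⟩, ?_⟩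
    · rw [PySem.List.slice_to p (by omega), PySem.List.slice_to w1 (by omega)]
      simpa using h4
    · rw [PySem.List.slice_from p (by omega),
          PySem.List.slice_from w2 (by omega : (0:Int) ≤ (w2.length : Int) - ((p.length : Int) - (i:Int)))]
      have he : ((w2.length : Int) - ((p.length : Int) - (i:Int))).toNat = w2.length - (p.length - i) := by
        omega
      rw [he]
      simpa using h5

-- ===== VERDICT (by name: the statement is the Claim_ definition above) =====
theorem isPortmanteau_spec : Claim_equal_isPortmanteau := by
  unfold Claim_equal_isPortmanteau
  intro word1 word2 proposed _ hpre
  unfold Spec_isPortmanteau isPortmanteau isPortmanteau_alt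
  by_cases g1 : proposed.toList = word1.toList ++ word2.toList
  · rw [if_pos g1, if_pos g1]
  rw [if_neg g1, if_neg g1]
  by_cases g2 : proposed.toList = word2.toList ++ word1.toList
  · rw [if_pos g2, if_pos g2]
  rw [if_neg g2, if_neg g2]
  by_cases g3 : proposed.toList = word1.toList ∨ proposed.toList = word2.toList
  · rw [if_pos g3, if_pos g3]
  rw [if_neg g3, if_neg g3]
  have hr : ¬ pvRch proposed.toList word1.toList word2.toList ∧
      (pvSplitB proposed.toList word1.toList word2.toList = true ∨
       ¬ pvRch proposed.toList word2.toList word1.toList) := by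
    rcases hpre with h | h | h | h | h
    · exact absurd h g1
    · exact absurd h g2
    · exact absurd (Or.inl h) g3
    · exact absurd (Or.inr h) g3
    · exact h
  obtain ⟨b1, e1, i1⟩ := pvCheck_eq proposed.toList word1.toList word2.toList hr.1
  have hb1 : b1 = pvSplits proposed.toList word1.toList word2.toList := by
    rw [Bool.eq_iff_iff, i1, pvSplits_iff]
  rcases hr.2 with hs | hr2
  · -- first check succeeds: A returns True via `or` short-circuit, B's first `splits` is True
    have hx : pvSplitEx proposed.toList word1.toList word2.toList := (pvSplitB_iff _ _ _).mp hs
    have hb1t : b1 = true := i1.mpr hx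
    have hps : pvSplits proposed.toList word1.toList word2.toList = true := by rw [← hb1]; exact hb1t
    rw [e1, hb1t, hps]
    simp
  · obtain ⟨b2, e2, i2⟩ := pvCheck_eq proposed.toList word2.toList word1.toList hr2
    have hb2 : b2 = pvSplits proposed.toList word2.toList word1.toList := by
      rw [Bool.eq_iff_iff, i2, pvSplits_iff]
    rw [e1, e2, ← hb1, ← hb2]
    cases b1 <;> cases b2 <;> simp
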